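-- pv_equiv track=rewrite | github.com/wilsalv-veri/SAURIA | verif/scripts/perf_analyzer/intervals.py | build_core_activity_intervals_from_events
-- ===== SOURCE A (Python) =====
-- def build_core_activity_intervals_from_events(
--     core_start_times: list[int],
--     core_done_times: list[int],
-- ) -> list[tuple[int, int]]:
--     if not core_start_times or not core_done_times:
--         return []
--     if len(core_start_times) != len(core_done_times):
--         return []
--
--     core_intervals: list[tuple[int, int]] = []
--     for core_start_time, core_done_time in zip(core_start_times, core_done_times):
--         if core_done_time < core_start_time:
--             return []
--         interval_end = core_done_time
--         if interval_end <= core_start_time: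
--             return []
--         core_intervals.append((core_start_time, interval_end))
--
--     return merge_intervals(core_intervals)
--
-- def merge_intervals(intervals: list[tuple[int, int]]) -> list[tuple[int, int]]:
--     if not intervals:
--         return []
--
--     merged: list[tuple[int, int]] = []
--     for start, end in sorted(intervals):
--         if end <= start:
--             continue
--         if not merged or start > merged[-1][1]:
--             merged.append((start, end))
--             continue
--         merged[-1] = (merged[-1][0], max(merged[-1][1], end))
--     return merged
-- ===== SOURCE B (Python) =====
-- def build_core_activity_intervals_from_events(
--     core_start_times: list[int],
--     core_done_times: list[int],
-- ) -> list[tuple[int, int]]: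
--     if not core_start_times or not core_done_times:
--         return []
--     if len(core_start_times) != len(core_done_times):
--         return []
--     pairs = list(zip(core_start_times, core_done_times))
--     if any(done <= start for start, done in pairs):
--         return []
--     merged: list[tuple[int, int]] = []
--     for start, done in reversed(sorted(pairs)):
--         hi = done
--         while merged and merged[0][0] <= hi:
--             hi = max(hi, merged[0][1])
--             merged.pop(0)
--         merged.insert(0, (start, hi))
--     return merged
-- ===== Notes on version B (the rewrite author's own statement) =====
-- stated objective: alternative
-- what changed: B validates all pairs up front with any(), then merges by scanning the sorted intervals right-to-left, absorbing overlapping intervals off the head of a stack and building the output back-to-front, instead of A's left-to-right fold that mutates the last appended interval.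
import Mathlib
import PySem

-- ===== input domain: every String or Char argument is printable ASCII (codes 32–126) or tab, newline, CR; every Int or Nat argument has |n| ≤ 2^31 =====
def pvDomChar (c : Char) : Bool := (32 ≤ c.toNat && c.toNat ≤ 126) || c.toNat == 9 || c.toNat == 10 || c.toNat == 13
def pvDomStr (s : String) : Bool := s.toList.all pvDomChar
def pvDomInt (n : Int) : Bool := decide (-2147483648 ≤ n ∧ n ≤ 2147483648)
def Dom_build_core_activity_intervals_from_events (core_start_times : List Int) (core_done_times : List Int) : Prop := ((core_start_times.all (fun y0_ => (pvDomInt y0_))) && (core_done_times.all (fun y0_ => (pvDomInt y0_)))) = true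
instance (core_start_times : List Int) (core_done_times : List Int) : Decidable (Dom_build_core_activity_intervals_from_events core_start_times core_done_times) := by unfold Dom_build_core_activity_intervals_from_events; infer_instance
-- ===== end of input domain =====

-- B merges the sorted intervals right-to-left, absorbing overlapping intervals off the head of a
-- stack (output built back-to-front); same return value as A's left-to-right last-element merge.

-- ===== PORT A =====
-- the per-pair validation loop: the first bad pair makes A return [] (modelled as none)
def pvBuildIntervals : List (Int × Int) → Option (List (Int × Int))
  | [] => some []
  | (s, d) :: rest =>
    if d < s then none
    else if d ≤ s then none
    else (pvBuildIntervals rest).map (fun t => (s, d) :: t)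

-- one iteration of merge_intervals' loop (merged[-1] read/write via getLastD/dropLast)
def pvMergeStep (merged : List (Int × Int)) (p : Int × Int) : List (Int × Int) :=
  if p.2 ≤ p.1 then merged
  else if merged = [] ∨ p.1 > (merged.getLastD (0, 0)).2 then merged ++ [p]
  else merged.dropLast ++ [((merged.getLastD (0, 0)).1, max (merged.getLastD (0, 0)).2 p.2)]

def pvMergeIntervals (intervals : List (Int × Int)) : List (Int × Int) :=
  if intervals = [] then []
  else (PySem.List.sorted2 intervals Prod.fst Prod.snd).foldl pvMergeStep []

def build_core_activity_intervals_from_events (core_start_times : List Int) (core_done_times : List Int) : List (Int × Int) :=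
  if core_start_times = [] ∨ core_done_times = [] then []
  else if core_start_times.length ≠ core_done_times.length then []
  else
    match pvBuildIntervals (core_start_times.zip core_done_times) with
    | none => []
    | some core_intervals => pvMergeIntervals core_intervals

-- ===== PORT B =====
-- the while-loop of B: absorb every stack head whose start is ≤ hi, then push (start, hi)
def pvAbsorb : List (Int × Int) → Int → Int → List (Int × Int)
  | [], s, hi => [(s, hi)]
  | (a, b) :: m, s, hi => if a ≤ hi then pvAbsorb m s (max hi b) else (s, hi) :: (a, b) :: m

def build_core_activity_intervals_from_events_alt (core_start_times : List Int) (core_done_times : List Int) : List (Int × Int) :=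
  if core_start_times = [] ∨ core_done_times = [] then []
  else if core_start_times.length ≠ core_done_times.length then []
  else
    let pairs := core_start_times.zip core_done_times
    if pairs.any (fun p => p.2 ≤ p.1) then []
    else ((PySem.List.sorted2 pairs Prod.fst Prod.snd).reverse).foldl
      (fun merged p => pvAbsorb merged p.1 p.2) []

-- ===== PRECONDITION & SPEC =====
def Spec_build_core_activity_intervals_from_events (core_start_times : List Int) (core_done_times : List Int) (out : List (Int × Int)) : Prop := out = build_core_activity_intervals_from_events_alt core_start_times core_done_times
instance (core_start_times : List Int) (core_done_times : List Int) (out : List (Int × Int)) : Decidable (Spec_build_core_activity_intervals_from_events core_start_times core_done_times out) := by unfold Spec_build_core_activity_intervals_from_events; infer_instance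

-- ===== CLAIM (what is proved, stated in full; the proofs are below) =====
def Claim_equal_build_core_activity_intervals_from_events : Prop := ∀ (core_start_times : List Int) (core_done_times : List Int), Dom_build_core_activity_intervals_from_events core_start_times core_done_times → Spec_build_core_activity_intervals_from_events core_start_times core_done_times (build_core_activity_intervals_from_events core_start_times core_done_times)

-- ===== LEMMAS AND PROOFS =====

-- canonical recursive merge of a start-sorted interval list (proof-side reference function)
def pvMergeA : List (Int × Int) → List (Int × Int)
  | [] => []
  | [p] => [p]
  | p :: q :: r => if q.1 > p.2 then p :: pvMergeA (q :: r) else pvMergeA ((p.1, max p.2 q.2) :: r)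
termination_by l => l.length

-- lexicographic ≤ on pairs, the order sorted2 ⟨fst,snd⟩ establishes
def pvRle (p q : Int × Int) : Prop := p.1 < q.1 ∨ (p.1 = q.1 ∧ p.2 ≤ q.2)

lemma pvRle_trans : ∀ {a b c : Int × Int}, pvRle a b → pvRle b c → pvRle a c := by
  intro a b c h1 h2; unfold pvRle at *; omega

lemma pairwise_insertBy (before : (Int × Int) → (Int × Int) → Bool)
    (h1 : ∀ a b, before a b = true → pvRle a b)
    (h2 : ∀ a b, before a b = false → pvRle b a) :
    ∀ (l : List (Int × Int)) (x : Int × Int), l.Pairwise pvRle →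
      (PySem.List.insertBy before x l).Pairwise pvRle := by
  intro l
  induction l with
  | nil => intro x _; simp [PySem.List.insertBy]
  | cons y ys ih =>
    intro x hp
    rw [List.pairwise_cons] at hp
    simp only [PySem.List.insertBy]
    by_cases hb : before x y = true
    · simp only [hb, if_pos]
      refine List.Pairwise.cons ?_ (List.Pairwise.cons hp.1 hp.2)
      intro z hz
      rcases List.mem_cons.mp hz with h | h
      · exact h ▸ h1 _ _ hb
      · exact pvRle_trans (h1 _ _ hb) (hp.1 z h)
    · rw [if_neg hb]
      refine List.Pairwise.cons ?_ (ih x hp.2)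
      intro z hz
      rcases (PySem.List.mem_insertBy before x z ys).mp hz with h | h
      · exact h ▸ h2 _ _ (by simpa using hb)
      · exact hp.1 z h
  
lemma pairwise_foldl_insertBy (before : (Int × Int) → (Int × Int) → Bool)
    (h1 : ∀ a b, before a b = true → pvRle a b)
    (h2 : ∀ a b, before a b = false → pvRle b a) :
    ∀ (xs acc : List (Int × Int)), acc.Pairwise pvRle →
      (xs.foldl (fun acc x => PySem.List.insertBy before x acc) acc).Pairwise pvRle := by
  intro xs
  induction xs with
  | nil => intro acc h; simpa using h
  | cons x xs ih =>
    intro acc h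
    simpa using ih _ (pairwise_insertBy before h1 h2 acc x h)

lemma sorted2_pairwise_lex (xs : List (Int × Int)) :
    (PySem.List.sorted2 xs Prod.fst Prod.snd).Pairwise pvRle := by
  have hdef : PySem.List.sorted2 xs Prod.fst Prod.snd =
      xs.foldl (fun acc x => PySem.List.insertBy
        (fun a b => decide (a.1 < b.1) || (!decide (b.1 < a.1) && decide (a.2 < b.2))) x acc) [] := rfl
  rw [hdef]
  apply pairwise_foldl_insertBy
  · intro a b h
    simp only [Bool.or_eq_true, Bool.and_eq_true, Bool.not_eq_true', decide_eq_true_eq,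
      decide_eq_false_iff_not] at h
    unfold pvRle; omega
  · intro a b h
    simp only [Bool.or_eq_false_iff, Bool.and_eq_false_iff, Bool.not_eq_false',
      decide_eq_true_eq, decide_eq_false_iff_not] at h
    unfold pvRle; omega
  · exact List.Pairwise.nil

-- ---------- A-side: the foldl with last-element mutation is pvMergeA ----------
lemma foldl_mergeStep_eq (xs : List (Int × Int)) :
    ∀ (front : List (Int × Int)) (a b : Int),
      (∀ p ∈ xs, p.1 < p.2) →
      xs.foldl pvMergeStep (front ++ [(a, b)]) = front ++ pvMergeA ((a, b) :: xs) := by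
  induction xs with
  | nil => intro front a b _; simp [pvMergeA]
  | cons x xs ih =>
    intro front a b hlt
    obtain ⟨s, e⟩ := x
    have hse : s < e := hlt (s, e) (by simp)
    have hstep : pvMergeStep (front ++ [(a, b)]) (s, e) =
        if s > b then (front ++ [(a, b)]) ++ [(s, e)] else front ++ [(a, max b e)] := by
      unfold pvMergeStep
      simp only [List.getLastD_concat, List.dropLast_concat]
      rw [if_neg (by simp; omega)]
      by_cases hgt : s > b
      · rw [if_pos (Or.inr hgt), if_pos hgt]
      · rw [if_neg (by simp [hgt]), if_neg hgt]
    rw [List.foldl_cons, hstep]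
    by_cases hgt : s > b
    · rw [if_pos hgt, ih (front ++ [(a, b)]) s e (fun p hp => hlt p (by simp [hp]))]
      have : pvMergeA ((a, b) :: (s, e) :: xs) = (a, b) :: pvMergeA ((s, e) :: xs) := by
        rw [pvMergeA]; simp [hgt]
      rw [this]; simp
    · rw [if_neg hgt, ih front a (max b e) (fun p hp => hlt p (by simp [hp]))]
      have : pvMergeA ((a, b) :: (s, e) :: xs) = pvMergeA ((a, max b e) :: xs) := by
        rw [pvMergeA]; simp [hgt]
      rw [this]

lemma foldl_mergeStep_nil (xs : List (Int × Int)) (h : ∀ p ∈ xs, p.1 < p.2) :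
    xs.foldl pvMergeStep [] = pvMergeA xs := by
  cases xs with
  | nil => simp [pvMergeA]
  | cons x xs =>
    obtain ⟨a, b⟩ := x
    have hab : a < b := h (a, b) (by simp)
    have h1 : pvMergeStep [] (a, b) = [] ++ [(a, b)] := by
      unfold pvMergeStep
      rw [if_neg (by simp; omega), if_pos (Or.inl rfl)]
    rw [List.foldl_cons, h1, foldl_mergeStep_eq xs [] a b (fun p hp => h p (by simp [hp]))]
    simp

-- ---------- B-side: absorbing into pvMergeA of the tail gives pvMergeA ----------
lemma pvMergeA_cons_cons (p q : Int × Int) (r : List (Int × Int)) :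
    pvMergeA (p :: q :: r) =
      if q.1 > p.2 then p :: pvMergeA (q :: r) else pvMergeA ((p.1, max p.2 q.2) :: r) := by
  rw [pvMergeA]

lemma absorb_mergeA : ∀ (n : Nat) (t : List (Int × Int)) (s d : Int),
    t.length ≤ n →
    ((s, d) :: t).Pairwise (fun p q => p.1 ≤ q.1) →
    pvAbsorb (pvMergeA t) s d = pvMergeA ((s, d) :: t) := by
  intro n
  induction n with
  | zero =>
    intro t s d hlen _
    have : t = [] := List.length_eq_zero_iff.mp (Nat.le_zero.mp hlen)
    subst this; simp [pvMergeA, pvAbsorb]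
  | succ n ih =>
    intro t s d hlen hp
    match t with
    | [] => simp [pvMergeA, pvAbsorb]
    | [(a, b)] =>
      rw [show pvMergeA [(a, b)] = [(a, b)] from by simp [pvMergeA]]
      rw [pvMergeA_cons_cons (s, d) (a, b) []]
      unfold pvAbsorb
      by_cases hle : a ≤ d
      · rw [if_pos hle, if_neg (by simp; omega)]
        simp [pvAbsorb, pvMergeA]
      · rw [if_neg hle, if_pos (by simp; omega)]
        simp [pvMergeA]
    | (a, b) :: (c, e) :: t'' =>
      have hsa : s ≤ a := (List.pairwise_cons.mp hp).1 (a, b) (by simp)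
      have hsc : s ≤ c := (List.pairwise_cons.mp hp).1 (c, e) (by simp)
      have hp' : ((a, b) :: (c, e) :: t'').Pairwise (fun p q : Int × Int => p.1 ≤ q.1) :=
        (List.pairwise_cons.mp hp).2
      rw [pvMergeA_cons_cons (a, b) (c, e) t'']
      by_cases hcb : c > b
      · rw [if_pos hcb]
        -- pvAbsorb ((a,b) :: pvMergeA ((c,e)::t'')) s d
        show pvAbsorb ((a, b) :: pvMergeA ((c, e) :: t'')) s d = _
        rw [pvAbsorb]
        by_cases had : a ≤ d
        · rw [if_pos had]
          have hrec := ih ((c, e) :: t'') s (max d b) (by simp at hlen ⊢; omega)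
            (by
              refine List.pairwise_cons.mpr ⟨?_, (List.pairwise_cons.mp hp').2⟩
              intro q hq
              rcases List.mem_cons.mp hq with h | h
              · subst h; exact hsc
              · exact le_trans hsc ((List.pairwise_cons.mp (List.pairwise_cons.mp hp').2).1 q h))
          rw [hrec]
          -- RHS: mergeA ((s,d)::(a,b)::(c,e)::t'') with a ≤ d
          rw [pvMergeA_cons_cons (s, d) (a, b) ((c, e) :: t''), if_neg (by omega)]
        · rw [if_neg had]
          rw [pvMergeA_cons_cons (s, d) (a, b) ((c, e) :: t''), if_pos (by omega)]
          rw [pvMergeA_cons_cons (a, b) (c, e) t'', if_pos hcb]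
      · rw [if_neg hcb]
        have hrec := ih ((a, max b e) :: t'') s d (by simp at hlen ⊢; omega)
          (by
            refine List.pairwise_cons.mpr ⟨?_, ?_⟩
            · intro q hq
              rcases List.mem_cons.mp hq with h | h
              · subst h; exact hsa
              · exact le_trans hsa
                  ((List.pairwise_cons.mp hp').1 q (List.mem_cons_of_mem _ h))
            · refine List.pairwise_cons.mpr ⟨?_, ?_⟩
              · intro q hq
                exact (List.pairwise_cons.mp hp').1 q (List.mem_cons_of_mem _ hq)
              · exact (List.pairwise_cons.mp (List.pairwise_cons.mp hp').2).2)
        rw [hrec]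
        -- show mergeA ((s,d)::(a,max b e)::t'') = mergeA ((s,d)::(a,b)::(c,e)::t'')
        rw [pvMergeA_cons_cons (s, d) (a, max b e) t'',
          pvMergeA_cons_cons (s, d) (a, b) ((c, e) :: t'')]
        by_cases had : a > d
        · rw [if_pos had, if_pos had, pvMergeA_cons_cons (a, b) (c, e) t'', if_neg hcb]
        · rw [if_neg had, if_neg had,
            pvMergeA_cons_cons (s, max d b) (c, e) t'', if_neg (by simp; omega)]
          have : max (max d b) e = max d (max b e) := by omega
          rw [this]

lemma foldr_absorb_eq (M : List (Int × Int))
    (hp : M.Pairwise (fun p q : Int × Int => p.1 ≤ q.1)) :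
    M.foldr (fun p m => pvAbsorb m p.1 p.2) [] = pvMergeA M := by
  induction M with
  | nil => simp [pvMergeA]
  | cons x t ih =>
    obtain ⟨s, d⟩ := x
    rw [List.foldr_cons, ih (List.pairwise_cons.mp hp).2]
    exact absorb_mergeA t.length t s d le_rfl hp

-- validation loop succeeds exactly on all-good pair lists, returning the list itself
lemma buildIntervals_eq_some (ps : List (Int × Int)) (h : ∀ p ∈ ps, p.1 < p.2) :
    pvBuildIntervals ps = some ps := by
  induction ps with
  | nil => rfl
  | cons x t ih =>
    obtain ⟨s, d⟩ := x
    have : s < d := h (s, d) (by simp)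
    rw [pvBuildIntervals, if_neg (by omega), if_neg (by omega),
      ih (fun p hp => h p (by simp [hp]))]
    rfl

lemma buildIntervals_eq_none (ps : List (Int × Int)) (h : ∃ p ∈ ps, p.2 ≤ p.1) :
    pvBuildIntervals ps = none := by
  induction ps with
  | nil => simp at h
  | cons x t ih =>
    obtain ⟨s, d⟩ := x
    rw [pvBuildIntervals]
    by_cases h1 : d < s
    · rw [if_pos h1]
    · rw [if_neg h1]
      by_cases h2 : d ≤ s
      · rw [if_pos h2]
      · rw [if_neg h2]
        have : ∃ p ∈ t, p.2 ≤ p.1 := by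
          rcases h with ⟨p, hp, hple⟩
          rcases List.mem_cons.mp hp with rfl | hmem
          · simp at hple; omega
          · exact ⟨p, hmem, hple⟩
        rw [ih this]; rfl

-- ===== VERDICT (by name: the statement is the Claim_ definition above) =====
theorem build_core_activity_intervals_from_events_spec : Claim_equal_build_core_activity_intervals_from_events := by
  intro css cds _
  unfold Spec_build_core_activity_intervals_from_events
  unfold build_core_activity_intervals_from_events build_core_activity_intervals_from_events_alt
  by_cases hemp : css = [] ∨ cds = []
  · rw [if_pos hemp, if_pos hemp]
  · rw [if_neg hemp, if_neg hemp]
    by_cases hlen : css.length ≠ cds.length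
    · rw [if_pos hlen, if_pos hlen]
    · rw [if_neg hlen, if_neg hlen]
      by_cases hbad : (css.zip cds).any (fun p => decide (p.2 ≤ p.1)) = true
      · have h1 := buildIntervals_eq_none (css.zip cds) (by simpa using hbad)
        simp only [h1, hbad, if_true]
      · have hgood : ∀ p ∈ css.zip cds, p.1 < p.2 := by
          intro p hp
          have := List.any_eq_false.mp (Bool.not_eq_true _ |>.mp hbad) p hp
          simp at this; omega
        have h2 := buildIntervals_eq_some (css.zip cds) hgood
        have hb' : (css.zip cds).any (fun p => decide (p.2 ≤ p.1)) = false := by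
          simpa using hbad
        simp only [h2, hb', Bool.false_eq_true, if_false]
        have hnz : css.zip cds ≠ [] := by
          have h1 : css ≠ [] := fun h => hemp (Or.inl h)
          have h2' : cds ≠ [] := fun h => hemp (Or.inr h)
          simp only [ne_eq, List.zip_eq_nil_iff]
          tauto
        unfold pvMergeIntervals
        rw [if_neg hnz]
        have hMp : (PySem.List.sorted2 (css.zip cds) Prod.fst Prod.snd).Pairwise
            (fun p q : Int × Int => p.1 ≤ q.1) :=
          (sorted2_pairwise_lex (css.zip cds)).imp (by intro a b h; unfold pvRle at h; omega)
        have hMgood : ∀ p ∈ PySem.List.sorted2 (css.zip cds) Prod.fst Prod.snd, p.1 < p.2 := by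
          intro p hp
          exact hgood p
            ((PySem.List.sorted2_perm (css.zip cds) Prod.fst Prod.snd false).mem_iff.mp hp)
        rw [foldl_mergeStep_nil _ hMgood, List.foldl_reverse]
        exact (foldr_absorb_eq _ hMp).symm
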